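-- pv_equiv track=rewrite | github.com/muratozkan/aoc2018 | day_4.py | asleep_minute
-- ===== SOURCE A (Python) =====
-- def asleep_minute(g, g_s):
--     ds = g_s.get(g)
--
--     mins = {}
--     for i in range(60):
--         mins[i] = 0
--
--     for (d, ms) in ds:
--         s_cur = 0
--         for m, w in ms:
--             if w:
--                 for i in range(s_cur, m):
--                     mins[i] += 1
--                 s_cur = 0
--             else:
--                 s_cur = m
--
--     return mins
-- ===== SOURCE B (Python) =====
-- def asleep_minute(g, g_s):
--     ds = g_s.get(g)
--
--     # difference map: +1 where a sleep interval starts, -1 where it ends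
--     diff = {}
--     for (d, ms) in ds:
--         s_cur = 0
--         for m, w in ms:
--             if w:
--                 if s_cur < m:
--                     diff[s_cur] = diff.get(s_cur, 0) + 1
--                     diff[m] = diff.get(m, 0) - 1
--                 s_cur = 0
--             else:
--                 s_cur = m
--
--     # one prefix-sum sweep over the 60 minutes
--     mins = {}
--     total = 0
--     for i in range(60):
--         total += diff.get(i, 0)
--         mins[i] = total
--     return mins
-- ===== Notes on version B (the rewrite author's own statement) =====
-- stated objective: alternative
-- what changed: Instead of incrementing every minute of every sleep interval, B records each interval as +1/-1 endpoint deltas in a difference map and recovers all 60 per-minute totals in a single prefix-sum sweep.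
import Mathlib
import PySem

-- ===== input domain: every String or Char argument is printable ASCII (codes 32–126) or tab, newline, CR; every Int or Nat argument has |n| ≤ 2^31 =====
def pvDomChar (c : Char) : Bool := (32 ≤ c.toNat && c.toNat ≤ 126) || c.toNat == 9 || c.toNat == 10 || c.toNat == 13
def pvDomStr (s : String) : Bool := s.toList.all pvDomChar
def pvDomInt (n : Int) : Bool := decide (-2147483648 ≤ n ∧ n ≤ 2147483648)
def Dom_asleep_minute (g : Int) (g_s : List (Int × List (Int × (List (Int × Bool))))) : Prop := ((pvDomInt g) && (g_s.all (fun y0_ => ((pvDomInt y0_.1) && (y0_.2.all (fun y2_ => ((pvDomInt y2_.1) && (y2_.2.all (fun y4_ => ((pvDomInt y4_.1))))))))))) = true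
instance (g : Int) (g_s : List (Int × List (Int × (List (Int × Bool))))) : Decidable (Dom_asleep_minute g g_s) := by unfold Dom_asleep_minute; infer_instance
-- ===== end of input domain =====

-- B replaces per-minute increments with +1/-1 endpoint deltas in a difference dict and one
-- prefix-sum sweep over the 60 minutes (objective: alternative algorithm, same results).

-- ===== PORT A =====
-- A-side helper: body of the inner event loop ('if w: bump every minute in range(s_cur, m)')
def asleepStepA (st : PySem.Dict Int Int × Int) (mw : Int × Bool) : PySem.Dict Int Int × Int :=
  if mw.2 then
    ((PySem.List.pyRange st.2 mw.1 1).foldl (fun d i => d.modify i 0 (· + 1)) st.1, 0)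
  else (st.1, mw.1)

-- A-side helper: one day's event loop starting from s_cur = 0
def asleepDayA (mins : PySem.Dict Int Int) (dms : Int × List (Int × Bool)) : PySem.Dict Int Int :=
  (dms.2.foldl asleepStepA (mins, 0)).1

-- A-side helper: the initial dict {0: 0, …, 59: 0}
def asleepInit : PySem.Dict Int Int :=
  (PySem.List.pyRange 0 60 1).foldl (fun d i => d.insert i 0) PySem.Dict.empty

def asleep_minute (g : Int) (g_s : List (Int × List (Int × (List (Int × Bool))))) : List (Int × Int) :=
  match List.lookup g g_s with
  | none => []   -- Python raises TypeError iterating None here; excluded by Pre_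
  | some ds => (ds.foldl asleepDayA asleepInit).items

-- ===== PORT B =====
-- B-side helper: body of the inner event loop (record interval endpoints as +1/-1 deltas)
def asleepStepB (st : PySem.Dict Int Int × Int) (mw : Int × Bool) : PySem.Dict Int Int × Int :=
  if mw.2 then
    (if st.2 < mw.1 then (st.1.modify st.2 0 (· + 1)).modify mw.1 0 (· - 1) else st.1, 0)
  else (st.1, mw.1)

-- B-side helper: one day's event loop starting from s_cur = 0
def asleepDayB (diff : PySem.Dict Int Int) (dms : Int × List (Int × Bool)) : PySem.Dict Int Int :=
  (dms.2.foldl asleepStepB (diff, 0)).1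

def asleep_minute_alt (g : Int) (g_s : List (Int × List (Int × (List (Int × Bool))))) : List (Int × Int) :=
  match List.lookup g g_s with
  | none => []   -- Python raises TypeError iterating None here; excluded by Pre_
  | some ds =>
    let diff := ds.foldl asleepDayB PySem.Dict.empty
    ((PySem.List.pyRange 0 60 1).foldl
        (fun (st : PySem.Dict Int Int × Int) i =>
          let t := st.2 + diff.getD i 0
          (st.1.insert i t, t)) (PySem.Dict.empty, 0)).1.items

-- ===== PRECONDITION & SPEC =====
-- okDay checks, event by event, that every executed wake interval [s_cur, m) is either empty
-- (m ≤ s_cur) or stays inside the minute keys 0..59 (0 ≤ s_cur and m ≤ 60); it only tracks the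
-- previous sleep minute, not anything either program computes.
def okDay : Int → List (Int × Bool) → Bool
  | _, [] => true
  | s, mw :: r =>
    if mw.2 then (decide (mw.1 ≤ s) || (decide (0 ≤ s) && decide (mw.1 ≤ 60))) && okDay 0 r
    else okDay mw.1 r

-- Pre_ excludes exactly the inputs where Python A raises: TypeError when g is not a key of g_s,
-- and KeyError when some executed sleep interval reaches a minute outside 0..59.
def Pre_asleep_minute (g : Int) (g_s : List (Int × List (Int × (List (Int × Bool))))) : Prop :=
  ((List.lookup g g_s).elim false (fun ds => ds.all (fun p => okDay 0 p.2))) = true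

instance (g : Int) (g_s : List (Int × List (Int × (List (Int × Bool))))) : Decidable (Pre_asleep_minute g g_s) := by unfold Pre_asleep_minute; infer_instance

def pvWitness_asleep_minute : Int × (List (Int × List (Int × (List (Int × Bool))))) :=
  (7, [(7, [(3, [(10, false), (25, true), (50, false), (60, true)]), (4, [(0, false), (1, true)])])])

def Spec_asleep_minute (g : Int) (g_s : List (Int × List (Int × (List (Int × Bool))))) (out : List (Int × Int)) : Prop := out = asleep_minute_alt g g_s
instance (g : Int) (g_s : List (Int × List (Int × (List (Int × Bool))))) (out : List (Int × Int)) : Decidable (Spec_asleep_minute g g_s out) := by unfold Spec_asleep_minute; infer_instance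

-- ===== CLAIM (what is proved, stated in full; the proofs are below) =====
def Claim_equal_asleep_minute : Prop := ∀ (g : Int) (g_s : List (Int × List (Int × (List (Int × Bool))))), Dom_asleep_minute g g_s → Pre_asleep_minute g g_s → Spec_asleep_minute g g_s (asleep_minute g g_s)

-- ===== LEMMAS AND PROOFS =====

-- the list of (sleep-start, wake) interval pairs a day's event list generates
def ivDay : Int → List (Int × Bool) → List (Int × Int)
  | _, [] => []
  | s, mw :: r => if mw.2 then (s, mw.1) :: ivDay 0 r else ivDay mw.1 r

-- how many intervals of L cover minute i
def cov (L : List (Int × Int)) (i : Int) : Int :=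
  (L.map (fun sm => if sm.1 ≤ i ∧ i < sm.2 then (1 : Int) else 0)).sum

-- the difference-array value at slot j produced by the intervals of L
def dv (L : List (Int × Int)) (j : Int) : Int :=
  (L.map (fun sm => if sm.1 < sm.2 then (if sm.1 = j then (1 : Int) else 0) - (if sm.2 = j then 1 else 0) else 0)).sum

theorem cov_cons (sm : Int × Int) (L : List (Int × Int)) (i : Int) :
    cov (sm :: L) i = (if sm.1 ≤ i ∧ i < sm.2 then (1 : Int) else 0) + cov L i := by
  simp [cov]
theorem cov_append (L M : List (Int × Int)) (i : Int) :
    cov (L ++ M) i = cov L i + cov M i := by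
  simp [cov]
theorem dv_cons (sm : Int × Int) (L : List (Int × Int)) (j : Int) :
    dv (sm :: L) j = (if sm.1 < sm.2 then (if sm.1 = j then (1 : Int) else 0) - (if sm.2 = j then 1 else 0) else 0) + dv L j := by
  simp [dv]
theorem dv_append (L M : List (Int × Int)) (j : Int) :
    dv (L ++ M) j = dv L j + dv M j := by
  simp [dv]

-- A's inner minute loop adds 1 exactly at the minutes of [s, m)
theorem bumpA_getD (s m : Int) (d : PySem.Dict Int Int) (j : Int) :
    ((PySem.List.pyRange s m 1).foldl (fun d i => d.modify i 0 (· + 1)) d).getD j 0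
      = d.getD j 0 + (if s ≤ j ∧ j < m then 1 else 0) := by
  rw [PySem.Dict.getD_foldl_modify_add_one]
  congr 1
  by_cases h : s ≤ j ∧ j < m
  · rw [List.count_eq_one_of_mem (PySem.List.nodup_pyRange_one s m) ((PySem.List.mem_pyRange_one).2 h)]
    simp [h]
  · rw [List.count_eq_zero_of_not_mem (fun hm => h ((PySem.List.mem_pyRange_one).1 hm))]
    simp [h]

-- A's inner minute loop keeps the key list 0..59 when the interval is empty or in range
theorem bumpA_keys (s m : Int) (d : PySem.Dict Int Int)
    (hok : m ≤ s ∨ (0 ≤ s ∧ m ≤ 60)) (hk : d.keys = PySem.List.pyRange 0 60 1) :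
    ((PySem.List.pyRange s m 1).foldl (fun d i => d.modify i 0 (· + 1)) d).keys
      = PySem.List.pyRange 0 60 1 := by
  rw [PySem.Dict.keys_foldl_modify (f := fun _ _ v => v + 1), PySem.Set.update_eq_append_filter, hk]
  have hfil : (PySem.Set.ofList (PySem.List.pyRange s m 1)).filter
      (fun y => !PySem.Set.contains (PySem.List.pyRange 0 60 1) y) = [] := by
    apply List.filter_eq_nil_iff.2
    intro y hy
    have hb := (PySem.List.mem_pyRange_one).1 ((PySem.Set.mem_ofList _ y).1 hy)
    rcases hok with h | h
    · exact absurd hb (by omega)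
    · simp [PySem.List.mem_pyRange_one]; omega
  rw [hfil, List.append_nil]

-- one day of A: keys preserved, counts increased by the day's interval coverage
theorem dayA_spec (ms : List (Int × Bool)) : ∀ (s : Int) (d : PySem.Dict Int Int),
    okDay s ms = true → d.keys = PySem.List.pyRange 0 60 1 →
    (ms.foldl asleepStepA (d, s)).1.keys = PySem.List.pyRange 0 60 1
      ∧ ∀ j, (ms.foldl asleepStepA (d, s)).1.getD j 0 = d.getD j 0 + cov (ivDay s ms) j := by
  induction ms with
  | nil => exact fun s d _ hk => ⟨hk, fun j => by simp [ivDay, cov]⟩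
  | cons mw r ih =>
    intro s d hok hk
    rcases mw with ⟨m, w⟩
    cases w with
    | true =>
      have hok' : (m ≤ s ∨ (0 ≤ s ∧ m ≤ 60)) ∧ okDay 0 r = true := by simpa [okDay] using hok
      have hstep : asleepStepA (d, s) (m, true)
          = ((PySem.List.pyRange s m 1).foldl (fun d i => d.modify i 0 (· + 1)) d, 0) := by
        simp [asleepStepA]
      have hiv : ivDay s ((m, true) :: r) = (s, m) :: ivDay 0 r := by simp [ivDay]
      simp only [List.foldl_cons, hstep, hiv]
      obtain ⟨K, G⟩ := ih 0 _ hok'.2 (bumpA_keys s m d hok'.1 hk)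
      refine ⟨K, fun j => ?_⟩
      rw [G j, bumpA_getD, cov_cons]
      ring
    | false =>
      have hok' : okDay m r = true := by simpa [okDay] using hok
      have hstep : asleepStepA (d, s) (m, false) = (d, m) := by simp [asleepStepA]
      have hiv : ivDay s ((m, false) :: r) = ivDay m r := by simp [ivDay]
      simp only [List.foldl_cons, hstep, hiv]
      exact ih m d hok' hk

-- all days of A
theorem foldA_spec (ds : List (Int × List (Int × Bool))) : ∀ (d : PySem.Dict Int Int),
    (∀ p ∈ ds, okDay 0 p.2 = true) → d.keys = PySem.List.pyRange 0 60 1 →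
    (ds.foldl asleepDayA d).keys = PySem.List.pyRange 0 60 1
      ∧ ∀ j, (ds.foldl asleepDayA d).getD j 0 = d.getD j 0 + cov (ds.flatMap (fun p => ivDay 0 p.2)) j := by
  induction ds with
  | nil => exact fun d _ hk => ⟨hk, fun j => by simp [cov]⟩
  | cons p ds ih =>
    intro d hall hk
    simp only [List.foldl_cons, List.flatMap_cons]
    obtain ⟨K, G⟩ := dayA_spec p.2 0 d (hall p (List.mem_cons_self)) hk
    obtain ⟨K2, G2⟩ := ih (asleepDayA d p) (fun q hq => hall q (List.mem_cons_of_mem _ hq)) K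
    refine ⟨K2, fun j => ?_⟩
    rw [G2 j, cov_append]
    show (asleepDayA d p).getD j 0 + _ = _
    rw [asleepDayA, G j]
    ring

-- one day of B: the difference dict picks up the day's +1/-1 endpoint deltas
theorem dayB_spec (ms : List (Int × Bool)) : ∀ (s : Int) (d : PySem.Dict Int Int) (j : Int),
    (ms.foldl asleepStepB (d, s)).1.getD j 0 = d.getD j 0 + dv (ivDay s ms) j := by
  induction ms with
  | nil => intro s d j; simp [ivDay, dv]
  | cons mw r ih =>
    intro s d j
    rcases mw with ⟨m, w⟩
    cases w with
    | true =>
      have hiv : ivDay s ((m, true) :: r) = (s, m) :: ivDay 0 r := by simp [ivDay]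
      by_cases hsm : s < m
      · have hstep : asleepStepB (d, s) (m, true)
            = ((d.modify s 0 (· + 1)).modify m 0 (· - 1), 0) := by simp [asleepStepB, hsm]
        simp only [List.foldl_cons, hstep, hiv, dv_cons]
        rw [ih]
        have hd : ((d.modify s 0 (· + 1)).modify m 0 (· - 1)).getD j 0
            = d.getD j 0 + ((if s = j then (1 : Int) else 0) - (if m = j then 1 else 0)) := by
          simp only [PySem.Dict.getD_modify]
          split_ifs <;> subst_vars <;> omega
        rw [hd, if_pos hsm]
        ring
      · have hstep : asleepStepB (d, s) (m, true) = (d, 0) := by simp [asleepStepB, hsm]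
        simp only [List.foldl_cons, hstep, hiv, dv_cons]
        rw [ih, if_neg hsm]
        ring
    | false =>
      have hstep : asleepStepB (d, s) (m, false) = (d, m) := by simp [asleepStepB]
      have hiv : ivDay s ((m, false) :: r) = ivDay m r := by simp [ivDay]
      simp only [List.foldl_cons, hstep, hiv]
      exact ih m d j

-- all days of B
theorem foldB_spec (ds : List (Int × List (Int × Bool))) : ∀ (d : PySem.Dict Int Int) (j : Int),
    (ds.foldl asleepDayB d).getD j 0 = d.getD j 0 + dv (ds.flatMap (fun p => ivDay 0 p.2)) j := by
  induction ds with
  | nil => intro d j; simp [dv]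
  | cons p ds ih =>
    intro d j
    simp only [List.foldl_cons, List.flatMap_cons]
    rw [ih, dv_append]
    show (asleepDayB d p).getD j 0 + _ = _
    rw [asleepDayB, dayB_spec]
    ring

-- A's initial dict {0:0, …, 59:0}
theorem mins0_items :
    asleepInit.items = (PySem.List.pyRange 0 60 1).map (fun i => (i, (0 : Int))) := by
  rw [asleepInit, PySem.Dict.items_foldl_insert_fresh (PySem.List.pyRange 0 60 1) (fun a => a) (fun _ => (0 : Int))
    PySem.Dict.empty (by intro a _; simp) (by simpa using PySem.List.nodup_pyRange_one 0 60)]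
  simp [show (PySem.Dict.empty : PySem.Dict Int Int).items = [] from rfl]

-- partial prefix sums of a function over 0..n
def pref (f : Int → Int) (n : Int) : Int := ((PySem.List.pyRange 0 n 1).map f).sum

theorem pref_succ (f : Int → Int) (n : Int) (h : 0 ≤ n) :
    pref f (n + 1) = pref f n + f n := by
  rw [pref, pref, PySem.List.pyRange_one_succ_right h, List.map_append, List.sum_append]
  simp


theorem sum_indicator (a lo hi : Int) :
    ((PySem.List.pyRange lo hi 1).map (fun j => if a = j then (1 : Int) else 0)).sum
      = if lo ≤ a ∧ a < hi then 1 else 0 := by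
  have h1 : ((PySem.List.pyRange lo hi 1).map (fun j => if a = j then (1 : Int) else 0)).sum
      = ((PySem.List.pyRange lo hi 1).countP (fun j => a == j) : Int) := by
    rw [← PySem.List.sum_map_ite_one_zero (fun j => a == j)]
    simp
  rw [h1]
  have h2 : (PySem.List.pyRange lo hi 1).countP (fun j => a == j)
      = (PySem.List.pyRange lo hi 1).count a := by
    rw [List.count]
    exact List.countP_congr (by intro x _; rw [Bool.beq_comm])
  rw [h2]
  by_cases h : lo ≤ a ∧ a < hi
  · rw [List.count_eq_one_of_mem (PySem.List.nodup_pyRange_one lo hi) ((PySem.List.mem_pyRange_one).2 h)]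
    simp [h]
  · rw [List.count_eq_zero_of_not_mem (fun hm => h ((PySem.List.mem_pyRange_one).1 hm))]
    simp [h]


-- B's final sweep builds {i : pref (i+1)} and carries pref n as the running total
theorem sweepB_spec (f : Int → Int) (n : Nat) (hn : n ≤ 60) :
    ((PySem.List.pyRange 0 (n : Int) 1).foldl
        (fun (st : PySem.Dict Int Int × Int) i =>
          let t := st.2 + f i
          (st.1.insert i t, t)) (PySem.Dict.empty, 0))
      = (PySem.Dict.mk ((PySem.List.pyRange 0 (n : Int) 1).map (fun i => (i, pref f (i + 1)))), pref f (n : Int)) := by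
  induction n with
  | zero =>
    simp [PySem.List.pyRange_one_eq_nil, pref]
    rfl
  | succ n ih =>
    have h0 : (0 : Int) ≤ (n : Int) := by positivity
    have hcast : ((n + 1 : Nat) : Int) = (n : Int) + 1 := by push_cast; ring
    rw [hcast, PySem.List.pyRange_one_succ_right h0, List.foldl_append, ih (by omega)]
    simp only [List.foldl_cons, List.foldl_nil]
    have hcon : (PySem.Dict.mk ((PySem.List.pyRange 0 (n : Int) 1).map (fun i => (i, pref f (i + 1))))).contains (n : Int) = false := by
      rw [PySem.Dict.contains_eq_decide_mem_keys]
      simp [PySem.List.mem_pyRange_one]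
    have hins := PySem.Dict.items_insert_of_not_contains
      (PySem.Dict.mk ((PySem.List.pyRange 0 (n : Int) 1).map (fun i => (i, pref f (i + 1)))))
      (pref f ((n : Int)) + f (n : Int)) hcon
    apply Prod.ext
    · apply PySem.Dict.ext
      rw [hins]
      simp [pref_succ f n h0]
    · simp [pref_succ f n h0]

-- summing the difference values over 0..i recovers the coverage count
theorem pref_dv_eq_cov (L : List (Int × Int))
    (hL : ∀ sm ∈ L, sm.1 < sm.2 → 0 ≤ sm.1 ∧ sm.2 ≤ 60) (i : Int) (h0 : 0 ≤ i) :
    pref (dv L) (i + 1) = cov L i := by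
  induction L with
  | nil =>
    rw [pref]
    have : List.map (dv []) (PySem.List.pyRange 0 (i + 1) 1)
        = List.map (fun _ => (0 : Int)) (PySem.List.pyRange 0 (i + 1) 1) :=
      List.map_congr_left (fun x _ => rfl)
    rw [this]
    simp [cov]
  | cons sm L ih =>
    have hterm : ((PySem.List.pyRange 0 (i + 1) 1).map
        (fun j => if sm.1 < sm.2 then (if sm.1 = j then (1 : Int) else 0) - (if sm.2 = j then 1 else 0) else 0)).sum
        = if sm.1 ≤ i ∧ i < sm.2 then 1 else 0 := by
      by_cases hlt : sm.1 < sm.2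
      · simp only [if_pos hlt]
        have hsplit : ∀ j : Int, (if sm.1 = j then (1 : Int) else 0) - (if sm.2 = j then 1 else 0)
            = (if sm.1 = j then (1 : Int) else 0) + (-1) * (if sm.2 = j then 1 else 0) := by intro j; ring
        simp only [hsplit]
        rw [show (fun j => (if sm.1 = j then (1 : Int) else 0) + (-1) * (if sm.2 = j then 1 else 0))
            = (fun j => (fun j => if sm.1 = j then (1 : Int) else 0) j + (fun j => (-1) * (if sm.2 = j then 1 else 0)) j) from rfl,
          PySem.List.sum_map_add_int]
        have hneg : ((PySem.List.pyRange 0 (i + 1) 1).map (fun j => (-1 : Int) * (if sm.2 = j then 1 else 0))).sum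
            = (-1) * ((PySem.List.pyRange 0 (i + 1) 1).map (fun j => if sm.2 = j then (1 : Int) else 0)).sum := by
          rw [← List.sum_map_mul_left]
        rw [hneg, sum_indicator, sum_indicator]
        have hb := hL sm List.mem_cons_self hlt
        split_ifs <;> omega
      · simp only [if_neg hlt]
        have : ¬ (sm.1 ≤ i ∧ i < sm.2) := by omega
        simp [this]
    have hpt : ∀ j : Int, dv (sm :: L) j = (fun j => (if sm.1 < sm.2 then (if sm.1 = j then (1 : Int) else 0) - (if sm.2 = j then 1 else 0) else 0)) j + (fun j => dv L j) j :=
      fun j => dv_cons sm L j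
    rw [pref, List.map_congr_left (fun (j : Int) _ => hpt j), PySem.List.sum_map_add_int, hterm,
      cov_cons]
    have ih' := ih (fun q hq => hL q (List.mem_cons_of_mem _ hq))
    rw [pref] at ih'
    rw [ih']

-- okDay bounds every nonempty interval the day generates
theorem ivDay_bounds (ms : List (Int × Bool)) : ∀ (s : Int), okDay s ms = true →
    ∀ sm ∈ ivDay s ms, sm.1 < sm.2 → 0 ≤ sm.1 ∧ sm.2 ≤ 60 := by
  induction ms with
  | nil => intro s _ sm hm; simp [ivDay] at hm
  | cons mw r ih =>
    intro s hok sm hm hlt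
    rcases mw with ⟨m, w⟩
    cases w with
    | true =>
      have hok' : (m ≤ s ∨ (0 ≤ s ∧ m ≤ 60)) ∧ okDay 0 r = true := by simpa [okDay] using hok
      have hiv : ivDay s ((m, true) :: r) = (s, m) :: ivDay 0 r := by simp [ivDay]
      rw [hiv] at hm
      rcases List.mem_cons.1 hm with h | h
      · subst h; rcases hok'.1 with h1 | h1 <;> [omega; exact h1]
      · exact ih 0 hok'.2 sm h hlt
    | false =>
      have hok' : okDay m r = true := by simpa [okDay] using hok
      have hiv : ivDay s ((m, false) :: r) = ivDay m r := by simp [ivDay]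
      rw [hiv] at hm
      exact ih m hok' sm hm hlt

theorem pref_congr (f g : Int → Int) (n : Int) (h : ∀ j, f j = g j) : pref f n = pref g n := by
  rw [pref, pref, List.map_congr_left (fun j _ => h j)]

-- ===== VERDICT (by name: the statement is the Claim_ definition above) =====
set_option maxRecDepth 8192 in
theorem asleep_minute_spec : Claim_equal_asleep_minute := by
  intro g gs _ hpre
  unfold Spec_asleep_minute asleep_minute asleep_minute_alt
  unfold Pre_asleep_minute at hpre
  cases hl : List.lookup g gs with
  | none => simp [hl] at hpre
  | some ds =>
    rw [hl] at hpre
    simp only [Option.elim, List.all_eq_true] at hpre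
    show (ds.foldl asleepDayA asleepInit).items
        = ((PySem.List.pyRange 0 60 1).foldl
            (fun (st : PySem.Dict Int Int × Int) i =>
              let t := st.2 + (ds.foldl asleepDayB PySem.Dict.empty).getD i 0
              (st.1.insert i t, t)) (PySem.Dict.empty, 0)).1.items
    have hk0 : asleepInit.keys = PySem.List.pyRange 0 60 1 := by
      show (asleepInit.items.map Prod.fst) = _
      rw [mins0_items]
      simp [Function.comp_def]
    obtain ⟨KA, GA⟩ := foldA_spec ds asleepInit hpre hk0
    have hg0 : ∀ i ∈ PySem.List.pyRange 0 60 1, asleepInit.getD i 0 = 0 := by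
      intro i hi
      have hmem : (i, (0 : Int)) ∈ asleepInit.items := by
        rw [mins0_items]; exact List.mem_map.2 ⟨i, hi, rfl⟩
      have hnd : asleepInit.keys.Nodup := by
        rw [hk0]; exact PySem.List.nodup_pyRange_one 0 60
      exact PySem.Dict.getD_of_mem_items asleepInit hmem hnd 0
    have hitemsA : (ds.foldl asleepDayA asleepInit).items
        = (PySem.List.pyRange 0 60 1).map (fun i => (i, cov (ds.flatMap (fun p => ivDay 0 p.2)) i)) := by
      rw [PySem.Dict.items_eq_map_keys _ (by rw [KA]; exact PySem.List.nodup_pyRange_one 0 60) 0]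
      rw [KA]
      exact List.map_congr_left (fun i hi => by rw [GA i, hg0 i hi, zero_add])
    rw [hitemsA]
    have hdv : ∀ j, (ds.foldl asleepDayB PySem.Dict.empty).getD j 0
        = dv (ds.flatMap (fun p => ivDay 0 p.2)) j := by
      intro j
      rw [foldB_spec]
      simp [PySem.Dict.getD_empty]
    have h60 : ((60 : Nat) : Int) = (60 : Int) := by norm_num
    rw [show (60 : Int) = ((60 : Nat) : Int) from h60.symm,
      sweepB_spec (fun i => (ds.foldl asleepDayB PySem.Dict.empty).getD i 0) 60 (le_refl _)]
    show _ = ((PySem.List.pyRange 0 ((60 : Nat) : Int) 1).map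
        (fun i => (i, pref (fun i => (ds.foldl asleepDayB PySem.Dict.empty).getD i 0) (i + 1))))
    rw [h60]
    apply List.map_congr_left
    intro i hi
    have hib := (PySem.List.mem_pyRange_one).1 hi
    have hL : ∀ sm ∈ ds.flatMap (fun p => ivDay 0 p.2), sm.1 < sm.2 → 0 ≤ sm.1 ∧ sm.2 ≤ 60 := by
      intro sm hm hlt
      obtain ⟨p, hp, hmem⟩ := List.mem_flatMap.1 hm
      exact ivDay_bounds p.2 0 (hpre p hp) sm hmem hlt
    rw [show pref (fun i => (ds.foldl asleepDayB PySem.Dict.empty).getD i 0) (i + 1)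
        = pref (dv (ds.flatMap (fun p => ivDay 0 p.2))) (i + 1) from pref_congr _ _ _ hdv,
      pref_dv_eq_cov _ hL i hib.1]
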